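-- pv_equiv track=rewrite | github.com/logysnail/PhyloScripts | SeqMod/Scripts/ana_BatchTajima'sD.py | calculate_segregating_sites
-- ===== SOURCE A (Python) =====
-- from itertools import combinations
--
-- def calculate_segregating_sites(sequences):
--     combos = combinations(sequences, 2)
--     indexes = []
--     for pair in combos:
--         seq_a = pair[0]
--         seq_b = pair[1]
--         for idx, (i, j) in enumerate(zip(seq_a, seq_b)):
--             if i != j:
--                 indexes.append(idx)
--     indexes = list(set(indexes))
--
--     S = len(indexes)
--     n = len(sequences)
--
--     denom = 0
--     for i in range(1, n):
--         denom += (float(1) / float(i))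
--
--     return S
-- ===== SOURCE B (Python) =====
-- def calculate_segregating_sites(sequences):
--     # Single pass per alignment column instead of all O(n^2) pairwise comparisons.
--     max_len = max(map(len, sequences), default=0)
--     count = 0
--     for idx in range(max_len):
--         column = [s[idx] for s in sequences if idx < len(s)]
--         if column and any(c != column[0] for c in column[1:]):
--             count += 1
--     return count
-- ===== Notes on version B (the rewrite author's own statement) =====
-- stated objective: faster
-- what changed: Replaces the all-pairs comparison that collects differing indexes into a set with a single per-column scan that marks a column segregating when not all of its characters agree.
import Mathlib
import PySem

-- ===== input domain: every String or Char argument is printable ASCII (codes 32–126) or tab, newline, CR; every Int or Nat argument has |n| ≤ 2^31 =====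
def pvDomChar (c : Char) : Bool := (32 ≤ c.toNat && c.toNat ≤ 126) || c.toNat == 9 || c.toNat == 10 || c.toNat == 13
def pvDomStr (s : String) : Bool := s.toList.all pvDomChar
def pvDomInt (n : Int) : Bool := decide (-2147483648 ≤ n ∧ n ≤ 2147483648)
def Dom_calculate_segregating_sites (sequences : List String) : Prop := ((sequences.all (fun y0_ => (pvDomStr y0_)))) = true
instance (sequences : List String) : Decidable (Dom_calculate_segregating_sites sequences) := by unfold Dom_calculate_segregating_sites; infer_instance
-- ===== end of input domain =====

-- B counts segregating alignment columns with one per-column scan instead of A's all-pairs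
-- collection of differing indexes into a set (asymptotically faster, as measured).


-- ===== PORT A =====
-- combinations(sequences, 2): pairs (sequences[i], sequences[j]) for i < j, in order
def pvPairs : List String → List (String × String)
  | [] => []
  | x :: xs => xs.map (fun y => (x, y)) ++ pvPairs xs

-- inner loop: for idx, (i, j) in enumerate(zip(seq_a, seq_b)): if i != j: indexes.append(idx)
def pvDiffIdxs (a b : List Char) : List Int :=
  (PySem.List.enumerate (a.zip b) 0).foldl
    (fun acc p => if p.2.1 != p.2.2 then acc ++ [p.1] else acc) []

-- The trailing 'denom' float loop of A is dead code (its result is unused) and is not ported.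
def calculate_segregating_sites (sequences : List String) : Int :=
  let indexes := (pvPairs sequences).foldl
    (fun acc pair => acc ++ pvDiffIdxs pair.1.toList pair.2.toList) []
  let indexes := PySem.Set.ofList indexes
  (indexes.length : Int)

-- ===== PORT B =====
-- column = [s[idx] for s in sequences if idx < len(s)]; segregating iff some later char differs from the first
def pvColSeg (sequences : List String) (idx : Nat) : Bool :=
  match sequences.filterMap (fun s => s.toList[idx]?) with
  | [] => false
  | c :: rest => rest.any (fun d => d ≠ c)

def calculate_segregating_sites_alt (sequences : List String) : Int :=
  let maxLen := sequences.foldl (fun m s => max m s.toList.length) 0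
  (((List.range maxLen).countP (fun idx => pvColSeg sequences idx) : Nat) : Int)

-- ===== PRECONDITION & SPEC =====
def Spec_calculate_segregating_sites (sequences : List String) (out : Int) : Prop := out = calculate_segregating_sites_alt sequences
instance (sequences : List String) (out : Int) : Decidable (Spec_calculate_segregating_sites sequences out) := by unfold Spec_calculate_segregating_sites; infer_instance

-- ===== CLAIM (what is proved, stated in full; the proofs are below) =====
def Claim_equal_calculate_segregating_sites : Prop := ∀ (sequences : List String), Dom_calculate_segregating_sites sequences → Spec_calculate_segregating_sites sequences (calculate_segregating_sites sequences)

-- ===== LEMMAS AND PROOFS =====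

-- "pair p differs at column idx" (both strings reach idx, with different characters)
def pvDiffAt (p : String × String) (idx : Nat) : Prop :=
  ∃ ca cb, p.1.toList[idx]? = some ca ∧ p.2.toList[idx]? = some cb ∧ ca ≠ cb

theorem mem_pvDiffIdxs {a b : List Char} {i : Int} :
    i ∈ pvDiffIdxs a b ↔ ∃ k : Nat, i = (k : Int) ∧
      ∃ ca cb, a[k]? = some ca ∧ b[k]? = some cb ∧ ca ≠ cb := by
  unfold pvDiffIdxs
  rw [PySem.List.foldl_append_if]
  simp only [List.nil_append, List.mem_map, List.mem_filter, PySem.List.mem_enumerate_iff]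
  constructor
  · rintro ⟨⟨n, c⟩, ⟨⟨k, hk, heq⟩, hne⟩, rfl⟩
    cases heq
    refine ⟨k, by simp, (a.zip b)[k].1, (a.zip b)[k].2, ?_, ?_, by simpa using hne⟩
    · rw [List.getElem_zip]; simp [(List.lt_length_left_of_zip hk)]
    · rw [List.getElem_zip]; simp [(List.lt_length_right_of_zip hk)]
  · rintro ⟨k, rfl, ca, cb, ha, hb, hne⟩
    obtain ⟨h1, e1⟩ := List.getElem?_eq_some_iff.mp ha
    obtain ⟨h2, e2⟩ := List.getElem?_eq_some_iff.mp hb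
    have hk : k < (a.zip b).length := by simp [List.length_zip]; omega
    refine ⟨(↑k, (a.zip b)[k]), ⟨⟨k, hk, by simp⟩, ?_⟩, rfl⟩
    rw [List.getElem_zip]; simp [e1, e2, hne]

theorem mem_indexes_iff {l : List String} {i : Int} :
    i ∈ (pvPairs l).foldl (fun acc pair => acc ++ pvDiffIdxs pair.1.toList pair.2.toList) [] ↔
      ∃ k : Nat, i = (k : Int) ∧ ∃ p ∈ pvPairs l, pvDiffAt p k := by
  rw [PySem.List.foldl_append_eq_flatMap]
  simp only [List.nil_append, List.mem_flatMap, mem_pvDiffIdxs]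
  unfold pvDiffAt
  constructor
  · rintro ⟨p, hp, k, hik, hd⟩; exact ⟨k, hik, p, hp, hd⟩
  · rintro ⟨k, hik, p, hp, hd⟩; exact ⟨p, hp, k, hik, hd⟩

theorem mem_of_mem_pvPairs {l : List String} {p : String × String} (hp : p ∈ pvPairs l) :
    p.1 ∈ l ∧ p.2 ∈ l := by
  induction l with
  | nil => simp [pvPairs] at hp
  | cons z zs ih =>
    simp only [pvPairs, List.mem_append, List.mem_map] at hp
    rcases hp with ⟨y, hy, rfl⟩ | hp
    · exact ⟨by simp, by simp [hy]⟩
    · exact ⟨List.mem_cons_of_mem _ (ih hp).1, List.mem_cons_of_mem _ (ih hp).2⟩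

theorem pvColSeg_cons_none {x : String} {xs : List String} {idx : Nat}
    (hx : x.toList[idx]? = none) : pvColSeg (x :: xs) idx = pvColSeg xs idx := by
  unfold pvColSeg; simp [hx]

theorem pvColSeg_cons_some {x : String} {xs : List String} {idx : Nat} {c : Char}
    (hx : x.toList[idx]? = some c) :
    pvColSeg (x :: xs) idx = true ↔ ∃ d ∈ xs.filterMap (fun s => s.toList[idx]?), d ≠ c := by
  unfold pvColSeg
  simp only [List.filterMap_cons, hx, List.any_eq_true, decide_not, Bool.not_eq_eq_eq_not,
    Bool.not_true, decide_eq_false_iff_not]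

theorem mem_col_iff {l : List String} {idx : Nat} {c : Char} :
    c ∈ l.filterMap (fun s => s.toList[idx]?) ↔ ∃ s ∈ l, s.toList[idx]? = some c := by
  simp [List.mem_filterMap]

theorem pvColSeg_iff {l : List String} {idx : Nat} :
    pvColSeg l idx = true ↔ ∃ p ∈ pvPairs l, pvDiffAt p idx := by
  induction l with
  | nil => simp [pvColSeg, pvPairs]
  | cons x xs ih =>
    rcases hx : x.toList[idx]? with _ | c
    · rw [pvColSeg_cons_none hx, ih]
      constructor
      · rintro ⟨p, hp, hd⟩
        exact ⟨p, by simp only [pvPairs, List.mem_append]; right; exact hp, hd⟩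
      · rintro ⟨p, hp, hd⟩
        simp only [pvPairs, List.mem_append, List.mem_map] at hp
        rcases hp with ⟨y, hy, rfl⟩ | hp
        · obtain ⟨ca, cb, ha, hb, hne⟩ := hd
          simp only [hx] at ha; cases ha
        · exact ⟨p, hp, hd⟩
    · rw [pvColSeg_cons_some hx]
      constructor
      · rintro ⟨d, hd, hne⟩
        obtain ⟨s, hs, hsd⟩ := mem_col_iff.mp hd
        refine ⟨(x, s), ?_, c, d, hx, hsd, fun h => hne h.symm⟩
        simp only [pvPairs, List.mem_append, List.mem_map]
        exact Or.inl ⟨s, hs, rfl⟩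
      · rintro ⟨p, hp, ca, cb, ha, hb, hne⟩
        simp only [pvPairs, List.mem_append, List.mem_map] at hp
        rcases hp with ⟨y, hy, rfl⟩ | hp
        · simp only at ha hb
          rw [hx] at ha; cases ha
          exact ⟨cb, mem_col_iff.mpr ⟨y, hy, hb⟩, fun h => hne h.symm⟩
        · obtain ⟨hm1, hm2⟩ := mem_of_mem_pvPairs hp
          have h1 := mem_col_iff.mpr ⟨p.1, hm1, ha⟩
          have h2 := mem_col_iff.mpr ⟨p.2, hm2, hb⟩
          by_cases hca : ca = c
          · exact ⟨cb, h2, by rw [hca] at hne; exact fun h => hne h.symm⟩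
          · exact ⟨ca, h1, hca⟩

theorem lt_maxLen_of_diff {l : List String} {p : String × String} {k : Nat}
    (hp : p ∈ pvPairs l) (hd : pvDiffAt p k) :
    k < l.foldl (fun m s => max m s.toList.length) 0 := by
  obtain ⟨ca, cb, ha, _, _⟩ := hd
  have hk : k < p.1.toList.length := (List.getElem?_eq_some_iff.mp ha).1
  have hm : p.1.toList.length ≤ l.foldl (fun m s => max m s.toList.length) 0 := by
    rw [show l.foldl (fun m s => max m s.toList.length) 0
        = (l.map (fun s => s.toList.length)).foldl max 0 from List.foldl_map.symm]
    exact (PySem.List.le_foldl_max (l.map (fun s => s.toList.length)) 0).2 _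
      (List.mem_map_of_mem (mem_of_mem_pvPairs hp).1)
  omega

-- ===== VERDICT (by name: the statement is the Claim_ definition above) =====
theorem calculate_segregating_sites_spec : Claim_equal_calculate_segregating_sites := by
  intro l _
  unfold Spec_calculate_segregating_sites calculate_segregating_sites calculate_segregating_sites_alt
  simp only
  congr 1
  -- both sides are sizes of the same finite set of column indexes
  set idxs := (pvPairs l).foldl (fun acc pair => acc ++ pvDiffIdxs pair.1.toList pair.2.toList) [] with hidxs
  set L := l.foldl (fun m s => max m s.toList.length) 0 with hL
  have hset : ∀ i : Int, i ∈ PySem.Set.ofList idxs ↔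
      ∃ k : Nat, i = (k : Int) ∧ k < L ∧ pvColSeg l k = true := by
    intro i
    rw [PySem.Set.mem_ofList, hidxs, mem_indexes_iff]
    constructor
    · rintro ⟨k, rfl, p, hp, hd⟩
      exact ⟨k, rfl, lt_maxLen_of_diff hp hd, pvColSeg_iff.mpr ⟨p, hp, hd⟩⟩
    · rintro ⟨k, rfl, _, hseg⟩
      obtain ⟨p, hp, hd⟩ := pvColSeg_iff.mp hseg
      exact ⟨k, rfl, p, hp, hd⟩
  -- compare with the filtered range, via nodup + equal membership
  have hfilter : (((List.range L).filter (fun idx => pvColSeg l idx)).map (Nat.cast (R := Int))).toFinset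
      = (PySem.Set.ofList idxs).toFinset := by
    apply Finset.ext
    intro i
    simp only [List.mem_toFinset, List.mem_map, List.mem_filter, List.mem_range, hset i]
    constructor
    · rintro ⟨k, ⟨hk, hs⟩, rfl⟩; exact ⟨k, rfl, hk, hs⟩
    · rintro ⟨k, rfl, hk, hs⟩; exact ⟨k, ⟨hk, hs⟩, rfl⟩
  have hnodup1 : (((List.range L).filter (fun idx => pvColSeg l idx)).map (Nat.cast (R := Int))).Nodup :=
    ((List.nodup_range).filter _).map (fun a b h => by exact_mod_cast h)
  have hnodup2 : (PySem.Set.ofList idxs).Nodup := PySem.Set.nodup_ofList idxs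
  have := congrArg Finset.card hfilter
  rw [List.toFinset_card_of_nodup hnodup1, List.toFinset_card_of_nodup hnodup2] at this
  rw [← this, List.length_map, List.countP_eq_length_filter]
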